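-- pv_equiv track=rewrite | github.com/praekeltfoundation/rp-sidekick | rp_yal/utils.py | get_content_search_term
-- ===== SOURCE A (Python) =====
-- def get_content_search_term(fields, last_topic_sent=None):
--     if not last_topic_sent:
--         last_topic_sent = fields.get("last_topic_sent", "")
--
--     risks = {
--         "depression": "depression_and_anxiety_risk",
--         "gender attitudes": "gender_attitude_risk",
--         "self perceived healthcare": "selfperceived_healthcare_risk",
--         "body image": "body_image_risk",
--         "connectedness": "connectedness_risk",
--     }
--
--     def all_complete():
--         return (
--             fields.get("depression_content_complete", "") == "true"
--             and fields.get("gender_attitude_content_complete", "") == "true"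
--             and fields.get("selfperceived_healthcare_complete", "") == "true"
--             and fields.get("body_image_content_complete", "") == "true"
--             and fields.get("connectedness_content_complete", "") == "true"
--         )
--
--     if fields.get("depression_and_anxiety_risk", "") == "low_risk":
--         if last_topic_sent == "depression":
--             if fields.get("gender_attitude_content_complete", "") == "true":
--                 return get_content_search_term(fields, "gender attitudes")
--             else:
--                 next_topic = "gender attitudes"
--         elif last_topic_sent == "gender attitudes":
--             if fields.get("selfperceived_healthcare_complete", "") == "true":
--                 return get_content_search_term(fields, "self perceived healthcare")
--             else:
--                 return "self perceived healthcare"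
--         elif last_topic_sent == "self perceived healthcare":
--             if fields.get("body_image_content_complete", "") == "true":
--                 return get_content_search_term(fields, "body image")
--             else:
--                 next_topic = "body image"
--         elif last_topic_sent == "body image":
--             if fields.get("connectedness_content_complete", "") == "true":
--                 return get_content_search_term(fields, "connectedness")
--             else:
--                 next_topic = "connectedness"
--         else:
--             if fields.get("depression_content_complete", "") == "true":
--                 if all_complete():
--                     return None
--                 else:
--                     return get_content_search_term(fields, "depression")
--             else:
--                 next_topic = "depression"
--     else:
--         if last_topic_sent == "self perceived healthcare":
--             if fields.get("gender_attitude_content_complete", "") == "true":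
--                 return get_content_search_term(fields, "gender attitudes")
--             else:
--                 next_topic = "gender attitudes"
--         elif last_topic_sent == "body image":
--             if fields.get("selfperceived_healthcare_complete", "") == "true":
--                 return get_content_search_term(fields, "self perceived healthcare")
--             else:
--                 return "self perceived healthcare"
--         elif last_topic_sent == "connectedness":
--             if fields.get("body_image_content_complete", "") == "true":
--                 return get_content_search_term(fields, "body image")
--             else:
--                 next_topic = "body image"
--         elif last_topic_sent == "depression":
--             if fields.get("connectedness_content_complete", "") == "true":
--                 return get_content_search_term(fields, "connectedness")
--             else:
--                 next_topic = "connectedness"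
--         else:
--             if fields.get("depression_content_complete", "") == "true":
--                 if all_complete():
--                     return None
--                 else:
--                     return get_content_search_term(fields, "depression")
--             else:
--                 next_topic = "depression"
--
--     risk_label = "high-risk"
--     if "low" in fields.get(risks[next_topic], ""):
--         risk_label = "mandatory"
--     return f"{next_topic} {risk_label}"
-- ===== SOURCE B (Python) =====
-- def get_content_search_term(fields, last_topic_sent=None):
--     if not last_topic_sent:
--         last_topic_sent = fields.get("last_topic_sent", "")
--
--     low = fields.get("depression_and_anxiety_risk", "") == "low_risk"
--     order = (
--         ["depression", "gender attitudes", "self perceived healthcare",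
--          "body image", "connectedness"]
--         if low else
--         ["depression", "connectedness", "body image",
--          "self perceived healthcare", "gender attitudes"]
--     )
--     complete_fields = {
--         "depression": "depression_content_complete",
--         "gender attitudes": "gender_attitude_content_complete",
--         "self perceived healthcare": "selfperceived_healthcare_complete",
--         "body image": "body_image_content_complete",
--         "connectedness": "connectedness_content_complete",
--     }
--     risks = {
--         "depression": "depression_and_anxiety_risk",
--         "gender attitudes": "gender_attitude_risk",
--         "self perceived healthcare": "selfperceived_healthcare_risk",
--         "body image": "body_image_risk",
--         "connectedness": "connectedness_risk",
--     }
--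
--     start = order.index(last_topic_sent) + 1 if last_topic_sent in order[:4] else 0
--     for topic in order[start:] + order[:start]:
--         if fields.get(complete_fields[topic], "") != "true":
--             if topic == "self perceived healthcare":
--                 return topic
--             label = "mandatory" if "low" in fields.get(risks[topic], "") else "high-risk"
--             return f"{topic} {label}"
--     return None
-- ===== Notes on version B (the rewrite author's own statement) =====
-- stated objective: simpler
-- what changed: Replaces A's branchy self-recursion over paired topic transitions by a data-driven single cyclic pass: an explicit ordered topic list per risk branch plus completeness/risk field tables, scanning the rotation of the order starting after last_topic_sent and returning the first incomplete topic.
import Mathlib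
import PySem

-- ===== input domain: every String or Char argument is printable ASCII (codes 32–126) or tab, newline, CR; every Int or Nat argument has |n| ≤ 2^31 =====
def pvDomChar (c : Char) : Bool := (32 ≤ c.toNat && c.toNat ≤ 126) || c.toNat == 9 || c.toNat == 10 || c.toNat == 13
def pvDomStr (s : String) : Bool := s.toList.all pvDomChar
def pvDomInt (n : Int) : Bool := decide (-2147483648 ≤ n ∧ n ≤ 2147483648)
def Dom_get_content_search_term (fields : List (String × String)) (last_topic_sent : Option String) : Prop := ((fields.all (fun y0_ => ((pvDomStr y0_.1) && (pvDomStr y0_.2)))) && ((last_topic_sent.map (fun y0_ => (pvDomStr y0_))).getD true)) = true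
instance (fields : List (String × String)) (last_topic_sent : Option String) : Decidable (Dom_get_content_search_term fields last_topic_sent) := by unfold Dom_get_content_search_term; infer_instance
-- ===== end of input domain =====

-- ===== PORT A =====
-- B replaces A's branchy self-recursion with a data-driven cyclic scan over explicit topic tables (objective: simpler).
-- fields.get(k, "") (both Pythons call it literally)
def pvGet (fields : List (String × String)) (k : String) : String :=
  PySem.Dict.getD (PySem.Dict.mk fields) k ""

def pvAllComplete (fields : List (String × String)) : Bool :=
  (pvGet fields "depression_content_complete" == "true") &&
  (pvGet fields "gender_attitude_content_complete" == "true") &&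
  (pvGet fields "selfperceived_healthcare_complete" == "true") &&
  (pvGet fields "body_image_content_complete" == "true") &&
  (pvGet fields "connectedness_content_complete" == "true")

def pvRisksA : PySem.Dict String String :=
  PySem.Dict.mk [("depression", "depression_and_anxiety_risk"),
   ("gender attitudes", "gender_attitude_risk"),
   ("self perceived healthcare", "selfperceived_healthcare_risk"),
   ("body image", "body_image_risk"),
   ("connectedness", "connectedness_risk")]

-- the tail of A after next_topic is set; risks[next_topic] always hits a key, so getD "" is exact here
def pvFinishA (fields : List (String × String)) (next_topic : String) : Option String :=
  let risk_label :=
    if PySem.Str.isIn "low" (pvGet fields (PySem.Dict.getD pvRisksA next_topic "")) then "mandatory"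
    else "high-risk"
  some (next_topic ++ " " ++ risk_label)

-- A's recursion, step for step; the Nat argument is fuel only (A's recursion depth is < 8, so fuel 10 is
-- never exhausted; recursive calls pass a non-empty last, so the top-level falsy check is a no-op there)
def pvGoA (fields : List (String × String)) : Nat → String → Option String
  | 0, _ => none
  | n+1, last =>
    if pvGet fields "depression_and_anxiety_risk" == "low_risk" then
      if last == "depression" then
        if pvGet fields "gender_attitude_content_complete" == "true" then
          pvGoA fields n "gender attitudes"
        else pvFinishA fields "gender attitudes"
      else if last == "gender attitudes" then
        if pvGet fields "selfperceived_healthcare_complete" == "true" then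
          pvGoA fields n "self perceived healthcare"
        else some "self perceived healthcare"
      else if last == "self perceived healthcare" then
        if pvGet fields "body_image_content_complete" == "true" then
          pvGoA fields n "body image"
        else pvFinishA fields "body image"
      else if last == "body image" then
        if pvGet fields "connectedness_content_complete" == "true" then
          pvGoA fields n "connectedness"
        else pvFinishA fields "connectedness"
      else
        if pvGet fields "depression_content_complete" == "true" then
          if pvAllComplete fields then none else pvGoA fields n "depression"
        else pvFinishA fields "depression"
    else
      if last == "self perceived healthcare" then
        if pvGet fields "gender_attitude_content_complete" == "true" then
          pvGoA fields n "gender attitudes"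
        else pvFinishA fields "gender attitudes"
      else if last == "body image" then
        if pvGet fields "selfperceived_healthcare_complete" == "true" then
          pvGoA fields n "self perceived healthcare"
        else some "self perceived healthcare"
      else if last == "connectedness" then
        if pvGet fields "body_image_content_complete" == "true" then
          pvGoA fields n "body image"
        else pvFinishA fields "body image"
      else if last == "depression" then
        if pvGet fields "connectedness_content_complete" == "true" then
          pvGoA fields n "connectedness"
        else pvFinishA fields "connectedness"
      else
        if pvGet fields "depression_content_complete" == "true" then
          if pvAllComplete fields then none else pvGoA fields n "depression"
        else pvFinishA fields "depression"

-- if not last_topic_sent: last_topic_sent = fields.get("last_topic_sent", "")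
def pvEffLast (fields : List (String × String)) (last_topic_sent : Option String) : String :=
  match last_topic_sent with
  | none => pvGet fields "last_topic_sent"
  | some s => if s == "" then pvGet fields "last_topic_sent" else s

def get_content_search_term (fields : List (String × String)) (last_topic_sent : Option String) : Option String :=
  pvGoA fields 10 (pvEffLast fields last_topic_sent)

-- ===== PORT B =====
def pvCompleteFieldsB : PySem.Dict String String :=
  PySem.Dict.mk [("depression", "depression_content_complete"),
   ("gender attitudes", "gender_attitude_content_complete"),
   ("self perceived healthcare", "selfperceived_healthcare_complete"),
   ("body image", "body_image_content_complete"),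
   ("connectedness", "connectedness_content_complete")]

def pvRisksB : PySem.Dict String String :=
  PySem.Dict.mk [("depression", "depression_and_anxiety_risk"),
   ("gender attitudes", "gender_attitude_risk"),
   ("self perceived healthcare", "selfperceived_healthcare_risk"),
   ("body image", "body_image_risk"),
   ("connectedness", "connectedness_risk")]

-- Source B's loop body: first topic of the rotated order whose completeness field is not "true"
def pvScanB (fields : List (String × String)) : List String → Option String
  | [] => none
  | topic :: rest =>
    if !(pvGet fields (PySem.Dict.getD pvCompleteFieldsB topic "") == "true") then
      if topic == "self perceived healthcare" then some topic
      else
        let label :=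
          if PySem.Str.isIn "low" (pvGet fields (PySem.Dict.getD pvRisksB topic "")) then "mandatory"
          else "high-risk"
        some (topic ++ " " ++ label)
    else pvScanB fields rest

def pvBCore (fields : List (String × String)) (last : String) : Option String :=
  let low := pvGet fields "depression_and_anxiety_risk" == "low_risk"
  let order : List String :=
    if low then
      ["depression", "gender attitudes", "self perceived healthcare", "body image", "connectedness"]
    else
      ["depression", "connectedness", "body image", "self perceived healthcare", "gender attitudes"]
  let start : Int :=
    if (PySem.List.slice order none (some 4)).contains last then
      ((PySem.List.index? order last).getD 0 : Nat) + 1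
    else 0
  pvScanB fields (PySem.List.slice order (some start) none ++ PySem.List.slice order none (some start))

def get_content_search_term_alt (fields : List (String × String)) (last_topic_sent : Option String) : Option String :=
  pvBCore fields (pvEffLast fields last_topic_sent)

-- ===== PRECONDITION & SPEC =====
def Spec_get_content_search_term (fields : List (String × String)) (last_topic_sent : Option String) (out : Option String) : Prop := out = get_content_search_term_alt fields last_topic_sent
instance (fields : List (String × String)) (last_topic_sent : Option String) (out : Option String) : Decidable (Spec_get_content_search_term fields last_topic_sent out) := by unfold Spec_get_content_search_term; infer_instance

-- ===== CLAIM (what is proved, stated in full; the proofs are below) =====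
def Claim_equal_get_content_search_term : Prop := ∀ (fields : List (String × String)) (last_topic_sent : Option String), Dom_get_content_search_term fields last_topic_sent → Spec_get_content_search_term fields last_topic_sent (get_content_search_term fields last_topic_sent)

-- ===== LEMMAS AND PROOFS =====
-- A's recursion and B's cyclic scan agree for every effective last topic: case split on the
-- risk mode, the five completeness flags and which (if any) known topic last is, then evaluate both ports.
set_option maxHeartbeats 4000000 in
theorem pvMain (fields : List (String × String)) (last : String) :
    pvGoA fields 10 last = pvBCore fields last := by
  by_cases hd : last = "depression"
  · subst hd
    by_cases hlow : pvGet fields "depression_and_anxiety_risk" = "low_risk" <;>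
    by_cases h1 : pvGet fields "depression_content_complete" = "true" <;>
    by_cases h2 : pvGet fields "gender_attitude_content_complete" = "true" <;>
    by_cases h3 : pvGet fields "selfperceived_healthcare_complete" = "true" <;>
    by_cases h4 : pvGet fields "body_image_content_complete" = "true" <;>
    by_cases h5 : pvGet fields "connectedness_content_complete" = "true" <;>
      simp [pvGoA, pvBCore, pvScanB, pvAllComplete, pvFinishA, hlow, h1, h2, h3, h4, h5,
        PySem.List.slice, PySem.List.clampIdx, pvRisksA, pvRisksB, pvCompleteFieldsB,
      List.idxOf?, List.findIdx?, List.findIdx?.go,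
      PySem.Dict.getD, PySem.Dict.get?]
  by_cases hg : last = "gender attitudes"
  · subst hg
    by_cases hlow : pvGet fields "depression_and_anxiety_risk" = "low_risk" <;>
    by_cases h1 : pvGet fields "depression_content_complete" = "true" <;>
    by_cases h2 : pvGet fields "gender_attitude_content_complete" = "true" <;>
    by_cases h3 : pvGet fields "selfperceived_healthcare_complete" = "true" <;>
    by_cases h4 : pvGet fields "body_image_content_complete" = "true" <;>
    by_cases h5 : pvGet fields "connectedness_content_complete" = "true" <;>
      simp [pvGoA, pvBCore, pvScanB, pvAllComplete, pvFinishA, hlow, h1, h2, h3, h4, h5,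
        PySem.List.slice, PySem.List.clampIdx, pvRisksA, pvRisksB, pvCompleteFieldsB,
      List.idxOf?, List.findIdx?, List.findIdx?.go,
      PySem.Dict.getD, PySem.Dict.get?]
  by_cases hs : last = "self perceived healthcare"
  · subst hs
    by_cases hlow : pvGet fields "depression_and_anxiety_risk" = "low_risk" <;>
    by_cases h1 : pvGet fields "depression_content_complete" = "true" <;>
    by_cases h2 : pvGet fields "gender_attitude_content_complete" = "true" <;>
    by_cases h3 : pvGet fields "selfperceived_healthcare_complete" = "true" <;>
    by_cases h4 : pvGet fields "body_image_content_complete" = "true" <;>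
    by_cases h5 : pvGet fields "connectedness_content_complete" = "true" <;>
      simp [pvGoA, pvBCore, pvScanB, pvAllComplete, pvFinishA, hlow, h1, h2, h3, h4, h5,
        PySem.List.slice, PySem.List.clampIdx, pvRisksA, pvRisksB, pvCompleteFieldsB,
      List.idxOf?, List.findIdx?, List.findIdx?.go,
      PySem.Dict.getD, PySem.Dict.get?]
  by_cases hb : last = "body image"
  · subst hb
    by_cases hlow : pvGet fields "depression_and_anxiety_risk" = "low_risk" <;>
    by_cases h1 : pvGet fields "depression_content_complete" = "true" <;>
    by_cases h2 : pvGet fields "gender_attitude_content_complete" = "true" <;>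
    by_cases h3 : pvGet fields "selfperceived_healthcare_complete" = "true" <;>
    by_cases h4 : pvGet fields "body_image_content_complete" = "true" <;>
    by_cases h5 : pvGet fields "connectedness_content_complete" = "true" <;>
      simp [pvGoA, pvBCore, pvScanB, pvAllComplete, pvFinishA, hlow, h1, h2, h3, h4, h5,
        PySem.List.slice, PySem.List.clampIdx, pvRisksA, pvRisksB, pvCompleteFieldsB,
      List.idxOf?, List.findIdx?, List.findIdx?.go,
      PySem.Dict.getD, PySem.Dict.get?]
  by_cases hc : last = "connectedness"
  · subst hc
    by_cases hlow : pvGet fields "depression_and_anxiety_risk" = "low_risk" <;>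
    by_cases h1 : pvGet fields "depression_content_complete" = "true" <;>
    by_cases h2 : pvGet fields "gender_attitude_content_complete" = "true" <;>
    by_cases h3 : pvGet fields "selfperceived_healthcare_complete" = "true" <;>
    by_cases h4 : pvGet fields "body_image_content_complete" = "true" <;>
    by_cases h5 : pvGet fields "connectedness_content_complete" = "true" <;>
      simp [pvGoA, pvBCore, pvScanB, pvAllComplete, pvFinishA, hlow, h1, h2, h3, h4, h5,
        PySem.List.slice, PySem.List.clampIdx, pvRisksA, pvRisksB, pvCompleteFieldsB,
      List.idxOf?, List.findIdx?, List.findIdx?.go,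
      PySem.Dict.getD, PySem.Dict.get?]
  by_cases hlow : pvGet fields "depression_and_anxiety_risk" = "low_risk" <;>
  by_cases h1 : pvGet fields "depression_content_complete" = "true" <;>
  by_cases h2 : pvGet fields "gender_attitude_content_complete" = "true" <;>
  by_cases h3 : pvGet fields "selfperceived_healthcare_complete" = "true" <;>
  by_cases h4 : pvGet fields "body_image_content_complete" = "true" <;>
  by_cases h5 : pvGet fields "connectedness_content_complete" = "true" <;>
    simp [pvGoA, pvBCore, pvScanB, pvAllComplete, pvFinishA, hlow, h1, h2, h3, h4, h5, hd, hg, hs, hb, hc,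
      PySem.List.slice, PySem.List.clampIdx, pvRisksA, pvRisksB, pvCompleteFieldsB,
      List.idxOf?, List.findIdx?, List.findIdx?.go,
      PySem.Dict.getD, PySem.Dict.get?]

-- ===== VERDICT (by name: the statement is the Claim_ definition above) =====
theorem get_content_search_term_spec : Claim_equal_get_content_search_term := by
  intro fields lts _
  unfold Spec_get_content_search_term get_content_search_term get_content_search_term_alt
  exact pvMain fields (pvEffLast fields lts)
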